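-- pv_equiv track=rewrite | github.com/TaniTani06/MC102 | lab12.py | retracao
-- ===== SOURCE A (Python) =====
-- def retracao(imagem_original):
--     a = 0
--     m = len(imagem_original[0])
--     n = len(imagem_original)
--     imagem = []
--     for i in range(1,n,2):
--         imagem.append([])
--         for j in range(1,m,2):
--             a = int((imagem_original[i-1][j-1] + imagem_original[i][j-1] + imagem_original[i-1][j] + imagem_original[i][j])/4)
--             imagem[int((i-1)/2)].append(a)
--
--     if (n%2) != 0 and (m%2) != 0: #ímpar e ímpar
--         imagem.append([])
--         for j in range(1,m,2):
--             imagem[-1].append(int((imagem_original[-1][j-1] + imagem_original[-1][j])/2))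
--         for i in range(1,n,2):
--             imagem[int((i-1)/2)].append(int((imagem_original[i-1][-1] + imagem_original[i][-1])/2))
--         imagem[-1].append(imagem_original[-1][-1])
--
--     if (n%2) != 0 and (m%2) == 0: #ímpar e par
--         imagem.append([])
--         for j in range(1,m,2):
--             imagem[-1].append(int((imagem_original[-1][j-1] + imagem_original[-1][j])/2))
--
--     if (n%2) == 0 and (m%2) != 0: #par e ímpar
--         for i in range(1,n,2):
--             imagem[int((i-1)/2)].append(int((imagem_original[i-1][-1] + imagem_original[i][-1])/2))
--     return imagem
-- ===== SOURCE B (Python) =====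
-- def retracao(imagem_original):
--     n = len(imagem_original)
--     m = len(imagem_original[0])
--     imagem = []
--     for r in range((n + 1) // 2):
--         linha = []
--         for c in range((m + 1) // 2):
--             px = [imagem_original[i][j]
--                   for i in (2 * r, 2 * r + 1) if i < n
--                   for j in (2 * c, 2 * c + 1) if j < m]
--             linha.append(int(sum(px) / len(px)))
--         imagem.append(linha)
--     return imagem
-- ===== Notes on version B (the rewrite author's own statement) =====
-- stated objective: simpler
-- what changed: Replaces A's stride-2 main loop plus three odd-dimension patch-up branches (which append into earlier rows by computed index and negative indices) with one uniform pass over output cells that gathers the in-bounds pixels of each clamped 2x2 block and averages them.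
-- outside the precondition, e.g. on retracao([]): A raises IndexError, B raises IndexError; on retracao([[1], [2, 3]]): A returns [[2]], B returns [[1]]; on retracao([[1, 2], [3]]): A raises IndexError, B raises IndexError
import Mathlib
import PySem

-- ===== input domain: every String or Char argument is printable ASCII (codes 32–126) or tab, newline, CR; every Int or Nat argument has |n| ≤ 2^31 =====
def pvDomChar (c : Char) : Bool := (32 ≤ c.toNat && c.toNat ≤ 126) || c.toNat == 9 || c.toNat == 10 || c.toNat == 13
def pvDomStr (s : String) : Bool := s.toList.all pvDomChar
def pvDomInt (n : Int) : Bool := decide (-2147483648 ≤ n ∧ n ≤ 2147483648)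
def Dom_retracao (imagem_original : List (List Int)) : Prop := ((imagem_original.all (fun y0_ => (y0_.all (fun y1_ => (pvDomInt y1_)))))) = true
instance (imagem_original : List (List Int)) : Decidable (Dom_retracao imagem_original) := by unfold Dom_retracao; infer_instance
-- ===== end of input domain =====

-- B replaces A's stride-2 main loop plus three odd-dimension patch-up branches with one
-- uniform pass over output cells averaging the in-bounds pixels of each clamped 2x2 block
-- (objective: simpler).


-- ===== PORT A =====
-- shared pixel access: imagem_original[i][j] for in-range nonnegative i, j (exact under
-- Pre_, where every index both Pythons use is in range; Python's int((…)/k) for k = 1,2,4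
-- on |sum| ≤ 4*2^31 is exact float division then truncation toward zero = Int.tdiv)
def pvPix (img : List (List Int)) (i j : Nat) : Int := (img.getD i []).getD j 0

-- literal port of A; range(1,len,2) over the Nat lengths is List.range' 1 (len/2) 2,
-- imagem[-1] is index imagem.length - 1, imagem_original[-1]/row[-1] are n-1 / m-1
-- (exact under Pre_: n ≥ 1, and the m-odd branches only run when m ≥ 1)
def retracao (imagem_original : List (List Int)) : List (List Int) :=
  let n := imagem_original.length
  let m := (imagem_original.getD 0 []).length
  let imagem : List (List Int) :=
    (List.range' 1 (n / 2) 2).foldl (fun acc i =>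
      let acc := acc ++ [[]]
      (List.range' 1 (m / 2) 2).foldl (fun acc j =>
        let a := (pvPix imagem_original (i-1) (j-1) + pvPix imagem_original i (j-1)
                  + pvPix imagem_original (i-1) j + pvPix imagem_original i j).tdiv 4
        acc.modify ((i-1)/2) (fun row => row ++ [a])) acc) []
  let imagem :=
    if n % 2 ≠ 0 ∧ m % 2 ≠ 0 then
      let imagem := imagem ++ [([] : List Int)]
      let imagem := (List.range' 1 (m / 2) 2).foldl (fun acc j =>
        acc.modify (acc.length - 1) (fun row =>
          row ++ [(pvPix imagem_original (n-1) (j-1) + pvPix imagem_original (n-1) j).tdiv 2])) imagem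
      let imagem := (List.range' 1 (n / 2) 2).foldl (fun acc i =>
        acc.modify ((i-1)/2) (fun row =>
          row ++ [(pvPix imagem_original (i-1) (m-1) + pvPix imagem_original i (m-1)).tdiv 2])) imagem
      imagem.modify (imagem.length - 1) (fun row => row ++ [pvPix imagem_original (n-1) (m-1)])
    else imagem
  let imagem :=
    if n % 2 ≠ 0 ∧ m % 2 = 0 then
      let imagem := imagem ++ [([] : List Int)]
      (List.range' 1 (m / 2) 2).foldl (fun acc j =>
        acc.modify (acc.length - 1) (fun row =>
          row ++ [(pvPix imagem_original (n-1) (j-1) + pvPix imagem_original (n-1) j).tdiv 2])) imagem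
    else imagem
  let imagem :=
    if n % 2 = 0 ∧ m % 2 ≠ 0 then
      (List.range' 1 (n / 2) 2).foldl (fun acc i =>
        acc.modify ((i-1)/2) (fun row =>
          row ++ [(pvPix imagem_original (i-1) (m-1) + pvPix imagem_original i (m-1)).tdiv 2])) imagem
    else imagem
  imagem

-- ===== PORT B =====
-- literal port of Source B: one map over output rows and columns; px is the comprehension's
-- list of in-bounds block pixels, int(sum(px)/len(px)) is Int.tdiv (exact: len ∈ {1,2,4})
def retracao_alt (imagem_original : List (List Int)) : List (List Int) :=
  let n := imagem_original.length
  let m := (imagem_original.getD 0 []).length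
  (List.range ((n + 1) / 2)).map (fun r =>
    (List.range ((m + 1) / 2)).map (fun c =>
      let px := ([2*r, 2*r+1].filter (fun i => i < n)).flatMap (fun i =>
                ([2*c, 2*c+1].filter (fun j => j < m)).map (fun j => pvPix imagem_original i j))
      px.sum.tdiv px.length))

-- ===== PRECONDITION & SPEC =====
-- Pre_ excludes the empty image, on which both Pythons raise IndexError at
-- len(imagem_original[0]); images with a row shorter than the first row, on which A
-- raises IndexError; and, when the first row's length m is odd, rows longer than m,
-- on which A's row[-1] accidentally reads an extra element beyond column m-1.
def Pre_retracao (imagem_original : List (List Int)) : Prop :=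
  imagem_original ≠ [] ∧
  (∀ row ∈ imagem_original, (imagem_original.headD []).length ≤ row.length) ∧
  ((imagem_original.headD []).length % 2 = 1 →
    ∀ row ∈ imagem_original, row.length = (imagem_original.headD []).length)
instance (imagem_original : List (List Int)) : Decidable (Pre_retracao imagem_original) := by
  unfold Pre_retracao; infer_instance
def pvWitness_retracao : List (List Int) := [[1, 2, 3], [4, 5, 6], [7, 8, 9]]
def Spec_retracao (imagem_original : List (List Int)) (out : List (List Int)) : Prop := out = retracao_alt imagem_original
instance (imagem_original : List (List Int)) (out : List (List Int)) : Decidable (Spec_retracao imagem_original out) := by unfold Spec_retracao; infer_instance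

-- ===== CLAIM (what is proved, stated in full; the proofs are below) =====
def Claim_equal_retracao : Prop := ∀ (imagem_original : List (List Int)), Dom_retracao imagem_original → Pre_retracao imagem_original → Spec_retracao imagem_original (retracao imagem_original)

-- ===== LEMMAS AND PROOFS =====

-- modifying the element just past a prefix
theorem pvModify_append_mid (front : List (List Int)) (r : List Int) (rest : List (List Int))
    (g : List Int → List Int) :
    (front ++ r :: rest).modify front.length g = front ++ g r :: rest := by
  induction front with
  | nil => simp [List.modify]
  | cons a l ih =>
    show (a :: (l ++ r :: rest)).modify (l.length + 1) g = a :: (l ++ g r :: rest)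
    simpa [List.modify] using ih

-- inner fold appending to the row at a fixed index = the row past `front`
theorem pvFoldl_modify_fix (xs : List Nat) (f : Nat → Int) (front : List (List Int)) (r : List Int) :
    xs.foldl (fun a j => a.modify front.length (fun row => row ++ [f j])) (front ++ [r])
      = front ++ [r ++ xs.map f] := by
  induction xs generalizing r with
  | nil => simp
  | cons x xs ih =>
    rw [List.foldl_cons, show (r : List Int) :: ([] : List (List Int)) = [r] from rfl]
    rw [show (front ++ [r] : List (List Int)) = front ++ r :: [] from rfl, pvModify_append_mid]
    rw [show (front ++ (r ++ [f x]) :: [] : List (List Int)) = front ++ [r ++ [f x]] from rfl, ih]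
    simp

-- same fold but indexing the last row each step
theorem pvFoldl_modify_last (xs : List Nat) (f : Nat → Int) (front : List (List Int)) (r : List Int) :
    xs.foldl (fun a j => a.modify (a.length - 1) (fun row => row ++ [f j])) (front ++ [r])
      = front ++ [r ++ xs.map f] := by
  induction xs generalizing r with
  | nil => simp
  | cons x xs ih =>
    rw [List.foldl_cons]
    have h1 : (front ++ [r]).length - 1 = front.length := by simp
    rw [h1, show (front ++ [r] : List (List Int)) = front ++ r :: [] from rfl, pvModify_append_mid]
    rw [show (front ++ (r ++ [f x]) :: [] : List (List Int)) = front ++ [r ++ [f x]] from rfl, ih]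
    simp

-- odd range as a map over List.range
theorem pvRange'_two (p : Nat) : List.range' 1 p 2 = (List.range p).map (fun c => 2*c+1) := by
  induction p with
  | zero => rfl
  | succ p ih => rw [List.range'_concat, List.range_succ, List.map_append, ih]; simp [Nat.add_comm]

set_option maxRecDepth 4000 in
-- A's main double loop builds the full-block rows
theorem pvMainLoop (p : Nat) (v : Nat → Nat → Int) :
    ∀ (q s : Nat) (acc : List (List Int)), acc.length = s →
    (List.range' (2*s+1) q 2).foldl
      (fun acc i => (List.range' 1 p 2).foldl
          (fun a j => a.modify ((i-1)/2) (fun row => row ++ [v i j])) (acc ++ [[]])) acc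
    = acc ++ (List.range q).map (fun k => (List.range' 1 p 2).map (fun j => v (2*(s+k)+1) j)) := by
  intro q
  induction q with
  | zero => intro s acc h; simp
  | succ q ih =>
    intro s acc h
    rw [List.range'_succ, List.foldl_cons]
    simp only [show (2*s+1-1)/2 = acc.length from by omega,
      show 2*s+1+2 = 2*(s+1)+1 from by omega]
    rw [pvFoldl_modify_fix, List.nil_append]
    rw [ih (s+1) _ (by simp [h])]
    simp only [List.range_succ_eq_map, List.map_cons, List.map_map, List.append_assoc,
      List.singleton_append]
    congr 1
    simp
    intro k _ j _
    have e : 2*(s+1+k)+1 = 2*(s+(k+1))+1 := by omega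
    rw [e]

set_option maxRecDepth 4000 in
-- A's edge-column fold appends one value to each of the first q rows
theorem pvSideLoop (G : Nat → Int) (R : Nat → List Int) :
    ∀ (q s : Nat) (front back : List (List Int)), front.length = s →
    (List.range' (2*s+1) q 2).foldl
      (fun a i => a.modify ((i-1)/2) (fun row => row ++ [G i]))
      (front ++ (List.range q).map (fun k => R (s+k)) ++ back)
    = front ++ (List.range q).map (fun k => R (s+k) ++ [G (2*(s+k)+1)]) ++ back := by
  intro q
  induction q with
  | zero => intro s front back h; simp
  | succ q ih =>
    intro s front back h
    rw [List.range'_succ, List.foldl_cons]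
    have hmap : ∀ (F : Nat → List Int), (List.range (q+1)).map (fun k => F (s+k))
        = F s :: (List.range q).map (fun k => F (s+1+k)) := by
      intro F
      rw [List.range_succ_eq_map, List.map_cons, List.map_map]
      congr 1
      simp
      intro k _
      have e : s+1+k = s+(k+1) := by omega
      rw [e]
    rw [hmap R, hmap (fun y => R y ++ [G (2*y+1)])]
    simp only [show (2*s+1-1)/2 = front.length from by omega,
      show 2*s+1+2 = 2*(s+1)+1 from by omega]
    rw [List.append_assoc, List.cons_append, pvModify_append_mid]
    have hre : front ++ (R s ++ [G (2*s+1)]) :: ((List.range q).map (fun k => R (s+1+k)) ++ back)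
        = (front ++ [R s ++ [G (2*s+1)]]) ++ (List.range q).map (fun k => R (s+1+k)) ++ back := by
      simp
    rw [hre, ih (s+1) _ back (by simp [h])]
    simp

-- the value of output cell (r, c): average of the in-bounds pixels of the clamped 2x2 block
def pvCell (img : List (List Int)) (r c : Nat) : Int :=
  if 2*r+1 < img.length then
    if 2*c+1 < (img.getD 0 []).length then
      (pvPix img (2*r) (2*c) + pvPix img (2*r+1) (2*c)
        + pvPix img (2*r) (2*c+1) + pvPix img (2*r+1) (2*c+1)).tdiv 4
    else (pvPix img (2*r) (2*c) + pvPix img (2*r+1) (2*c)).tdiv 2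
  else
    if 2*c+1 < (img.getD 0 []).length then
      (pvPix img (2*r) (2*c) + pvPix img (2*r) (2*c+1)).tdiv 2
    else pvPix img (2*r) (2*c)

-- B computes exactly the grid of pvCell values
theorem pvB_char (img : List (List Int)) :
    retracao_alt img
      = (List.range ((img.length+1)/2)).map (fun r =>
          (List.range (((img.getD 0 []).length+1)/2)).map (fun c => pvCell img r c)) := by
  simp only [retracao_alt]
  apply List.map_congr_left
  intro r hr
  apply List.map_congr_left
  intro c hc
  rw [List.mem_range] at hr hc
  have hrn : 2*r < img.length := by omega
  have hcm : 2*c < (img.getD 0 []).length := by omega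
  simp only [pvCell, List.filter_cons, List.filter_nil, decide_eq_true_eq]
  by_cases h1 : 2*r+1 < img.length <;> by_cases h2 : 2*c+1 < (img.getD 0 []).length
  · rw [if_pos hrn, if_pos h1, if_pos hcm, if_pos h2, if_pos h1, if_pos h2]
    simp only [List.flatMap_cons, List.flatMap_nil, List.map_cons, List.map_nil,
      List.append_nil, List.cons_append, List.sum_cons, List.sum_nil,
      List.length_cons, List.length_nil]
    norm_num
    congr 1
    ring
  · rw [if_pos hrn, if_pos h1, if_pos hcm, if_neg h2, if_pos h1, if_neg h2]
    simp only [List.flatMap_cons, List.flatMap_nil, List.map_cons, List.map_nil,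
      List.append_nil, List.cons_append, List.nil_append, List.sum_cons, List.sum_nil,
      List.length_cons, List.length_nil]
    norm_num
  · rw [if_pos hrn, if_neg h1, if_pos hcm, if_pos h2, if_neg h1, if_pos h2]
    simp only [List.flatMap_cons, List.flatMap_nil, List.map_cons, List.map_nil,
      List.append_nil, List.cons_append, List.nil_append, List.sum_cons, List.sum_nil,
      List.length_cons, List.length_nil]
    norm_num
  · rw [if_pos hrn, if_neg h1, if_pos hcm, if_neg h2, if_neg h1, if_neg h2]
    simp only [List.flatMap_cons, List.flatMap_nil, List.map_cons, List.map_nil,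
      List.append_nil, List.cons_append, List.nil_append, List.sum_cons, List.sum_nil,
      List.length_cons, List.length_nil]
    norm_num

-- A's full-block row equals the pvCell row
theorem pvRowFull (img : List (List Int)) (k : Nat) (hk : 2*k+1 < img.length) :
    (List.range' 1 ((img.getD 0 []).length/2) 2).map (fun j =>
      (pvPix img (2*k) (j-1) + pvPix img (2*k+1) (j-1)
        + pvPix img (2*k) j + pvPix img (2*k+1) j).tdiv 4)
    = (List.range ((img.getD 0 []).length/2)).map (fun c => pvCell img k c) := by
  rw [pvRange'_two, List.map_map]
  apply List.map_congr_left
  intro c hc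
  rw [List.mem_range] at hc
  have h2 : 2*c+1 < (img.getD 0 []).length := by omega
  simp only [Function.comp_def, pvCell, Nat.add_sub_cancel]
  rw [if_pos hk, if_pos h2]

-- A's bottom edge row equals the pvCell row (n odd)
theorem pvRowBot (img : List (List Int)) (hn : img.length % 2 = 1) :
    (List.range' 1 ((img.getD 0 []).length/2) 2).map (fun j =>
      (pvPix img (img.length-1) (j-1) + pvPix img (img.length-1) j).tdiv 2)
    = (List.range ((img.getD 0 []).length/2)).map (fun c => pvCell img (img.length/2) c) := by
  rw [pvRange'_two, List.map_map]
  apply List.map_congr_left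
  intro c hc
  rw [List.mem_range] at hc
  have h1 : ¬ 2*(img.length/2)+1 < img.length := by omega
  have h2 : 2*c+1 < (img.getD 0 []).length := by omega
  have e : 2*(img.length/2) = img.length - 1 := by omega
  simp only [Function.comp_def, pvCell, Nat.add_sub_cancel]
  rw [if_neg h1, if_pos h2, e]

-- the right-edge cell (m odd)
theorem pvCellEdge (img : List (List Int)) (k : Nat) (hk : 2*k+1 < img.length)
    (hm : (img.getD 0 []).length % 2 = 1) :
    pvCell img k ((img.getD 0 []).length/2)
      = (pvPix img (2*k) ((img.getD 0 []).length-1)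
          + pvPix img (2*k+1) ((img.getD 0 []).length-1)).tdiv 2 := by
  have h2 : ¬ 2*((img.getD 0 []).length/2)+1 < (img.getD 0 []).length := by omega
  have e : 2*((img.getD 0 []).length/2) = (img.getD 0 []).length - 1 := by omega
  simp only [pvCell]
  rw [if_pos hk, if_neg h2, e]

-- the corner cell (n odd, m odd)
theorem pvCellCorner (img : List (List Int)) (hn : img.length % 2 = 1)
    (hm : (img.getD 0 []).length % 2 = 1) :
    pvCell img (img.length/2) ((img.getD 0 []).length/2)
      = pvPix img (img.length-1) ((img.getD 0 []).length-1) := by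
  have h1 : ¬ 2*(img.length/2)+1 < img.length := by omega
  have h2 : ¬ 2*((img.getD 0 []).length/2)+1 < (img.getD 0 []).length := by omega
  have e1 : 2*(img.length/2) = img.length - 1 := by omega
  have e2 : 2*((img.getD 0 []).length/2) = (img.getD 0 []).length - 1 := by omega
  simp only [pvCell]
  rw [if_neg h1, if_neg h2, e1, e2]

-- A computes exactly the grid of pvCell values
theorem pvA_char (img : List (List Int)) :
    retracao img
      = (List.range ((img.length+1)/2)).map (fun r =>
          (List.range (((img.getD 0 []).length+1)/2)).map (fun c => pvCell img r c)) := by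
  have hmain := pvMainLoop ((img.getD 0 []).length/2)
    (fun i j => (pvPix img (i-1) (j-1) + pvPix img i (j-1)
      + pvPix img (i-1) j + pvPix img i j).tdiv 4) (img.length/2) 0 [] rfl
  simp only [Nat.zero_add, List.nil_append, Nat.mul_zero, Nat.add_sub_cancel] at hmain
  simp only [retracao]
  rw [hmain]
  rcases Nat.mod_two_eq_zero_or_one img.length with hn | hn <;>
    rcases Nat.mod_two_eq_zero_or_one (img.getD 0 []).length with hm | hm
  · -- n even, m even: the main loop is everything
    rw [if_neg (by omega : ¬(img.length % 2 = 0 ∧ (img.getD 0 []).length % 2 ≠ 0)),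
        if_neg (by omega : ¬(img.length % 2 ≠ 0 ∧ (img.getD 0 []).length % 2 = 0)),
        if_neg (by omega : ¬(img.length % 2 ≠ 0 ∧ (img.getD 0 []).length % 2 ≠ 0))]
    rw [show (img.length+1)/2 = img.length/2 from by omega,
        show ((img.getD 0 []).length+1)/2 = (img.getD 0 []).length/2 from by omega]
    apply List.map_congr_left
    intro k hk
    rw [List.mem_range] at hk
    exact pvRowFull img k (by omega)
  · -- n even, m odd: side column appended to each row
    rw [if_neg (by omega : ¬(img.length % 2 ≠ 0 ∧ (img.getD 0 []).length % 2 = 0)),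
        if_neg (by omega : ¬(img.length % 2 ≠ 0 ∧ (img.getD 0 []).length % 2 ≠ 0)),
        if_pos (⟨by omega, by omega⟩ : img.length % 2 = 0 ∧ (img.getD 0 []).length % 2 ≠ 0)]
    have hside := pvSideLoop
      (fun i => (pvPix img (i-1) ((img.getD 0 []).length - 1)
        + pvPix img i ((img.getD 0 []).length - 1)).tdiv 2)
      (fun k => (List.range' 1 ((img.getD 0 []).length/2) 2).map
        (fun j => (pvPix img (2*k) (j-1) + pvPix img (2*k+1) (j-1)
          + pvPix img (2*k) j + pvPix img (2*k+1) j).tdiv 4))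
      (img.length/2) 0 [] [] rfl
    simp only [Nat.zero_add, List.nil_append, List.append_nil, Nat.mul_zero] at hside
    rw [hside]
    rw [show (img.length+1)/2 = img.length/2 from by omega,
        show ((img.getD 0 []).length+1)/2 = (img.getD 0 []).length/2 + 1 from by omega]
    apply List.map_congr_left
    intro k hk
    rw [List.mem_range] at hk
    have hk' : 2*k+1 < img.length := by omega
    rw [List.range_succ, List.map_append, List.map_cons, List.map_nil]
    congr 1
    · exact pvRowFull img k hk'
    · rw [pvCellEdge img k hk' hm]
      simp only [Nat.add_sub_cancel]
  · -- n odd, m even: bottom row appended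
    rw [if_neg (by omega : ¬(img.length % 2 = 0 ∧ (img.getD 0 []).length % 2 ≠ 0)),
        if_pos (⟨by omega, by omega⟩ : img.length % 2 ≠ 0 ∧ (img.getD 0 []).length % 2 = 0),
        if_neg (by omega : ¬(img.length % 2 ≠ 0 ∧ (img.getD 0 []).length % 2 ≠ 0))]
    rw [pvFoldl_modify_last, List.nil_append]
    rw [show (img.length+1)/2 = img.length/2 + 1 from by omega,
        show ((img.getD 0 []).length+1)/2 = (img.getD 0 []).length/2 from by omega]
    rw [List.range_succ, List.map_append, List.map_cons, List.map_nil]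
    congr 1
    · apply List.map_congr_left
      intro k hk
      rw [List.mem_range] at hk
      exact pvRowFull img k (by omega)
    · rw [pvRowBot img hn]
  · -- n odd, m odd: bottom row, side column and corner
    rw [if_neg (by omega : ¬(img.length % 2 = 0 ∧ (img.getD 0 []).length % 2 ≠ 0)),
        if_neg (by omega : ¬(img.length % 2 ≠ 0 ∧ (img.getD 0 []).length % 2 = 0)),
        if_pos (⟨by omega, by omega⟩ : img.length % 2 ≠ 0 ∧ (img.getD 0 []).length % 2 ≠ 0)]
    rw [pvFoldl_modify_last, List.nil_append]
    have hside := pvSideLoop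
      (fun i => (pvPix img (i-1) ((img.getD 0 []).length - 1)
        + pvPix img i ((img.getD 0 []).length - 1)).tdiv 2)
      (fun k => (List.range' 1 ((img.getD 0 []).length/2) 2).map
        (fun j => (pvPix img (2*k) (j-1) + pvPix img (2*k+1) (j-1)
          + pvPix img (2*k) j + pvPix img (2*k+1) j).tdiv 4))
      (img.length/2) 0 []
      [(List.range' 1 ((img.getD 0 []).length/2) 2).map
        (fun j => (pvPix img (img.length-1) (j-1) + pvPix img (img.length-1) j).tdiv 2)] rfl
    simp only [Nat.zero_add, List.nil_append, Nat.mul_zero] at hside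
    rw [hside]
    have hlen : ((List.range (img.length/2)).map (fun k =>
        (List.range' 1 ((img.getD 0 []).length/2) 2).map
          (fun j => (pvPix img (2*k) (j-1) + pvPix img (2*k+1) (j-1)
            + pvPix img (2*k) j + pvPix img (2*k+1) j).tdiv 4)
        ++ [(pvPix img (2*k+1-1) ((img.getD 0 []).length - 1)
          + pvPix img (2*k+1) ((img.getD 0 []).length - 1)).tdiv 2])
        ++ [(List.range' 1 ((img.getD 0 []).length/2) 2).map
          (fun j => (pvPix img (img.length-1) (j-1) + pvPix img (img.length-1) j).tdiv 2)]).length - 1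
        = ((List.range (img.length/2)).map (fun k =>
        (List.range' 1 ((img.getD 0 []).length/2) 2).map
          (fun j => (pvPix img (2*k) (j-1) + pvPix img (2*k+1) (j-1)
            + pvPix img (2*k) j + pvPix img (2*k+1) j).tdiv 4)
        ++ [(pvPix img (2*k+1-1) ((img.getD 0 []).length - 1)
          + pvPix img (2*k+1) ((img.getD 0 []).length - 1)).tdiv 2])).length := by
      simp
    rw [hlen, pvModify_append_mid]
    rw [show (img.length+1)/2 = img.length/2 + 1 from by omega,
        show ((img.getD 0 []).length+1)/2 = (img.getD 0 []).length/2 + 1 from by omega]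
    rw [show List.range (img.length/2 + 1) = List.range (img.length/2) ++ [img.length/2]
          from List.range_succ,
        List.map_append, List.map_cons, List.map_nil]
    congr 1
    · apply List.map_congr_left
      intro k hk
      rw [List.mem_range] at hk
      have hk' : 2*k+1 < img.length := by omega
      rw [List.range_succ, List.map_append, List.map_cons, List.map_nil]
      congr 1
      · exact pvRowFull img k hk'
      · rw [pvCellEdge img k hk' hm]
        simp only [Nat.add_sub_cancel]
    · rw [List.range_succ, List.map_append, List.map_cons, List.map_nil]
      rw [pvRowBot img hn, pvCellCorner img hn hm]

-- ===== VERDICT (by name: the statement is the Claim_ definition above) =====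
theorem retracao_spec : Claim_equal_retracao := by
  intro imagem_original _ _
  unfold Spec_retracao
  rw [pvA_char, pvB_char]
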